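-- pv_equiv track=rewrite | github.com/Aliyahu-H/review1 | execute/encoder.py | check_inventory
-- ===== SOURCE A (Python) =====
-- def check_inventory(_inventory, requirements):
--     if len(requirements) == 0:
--         return True
--     _inv = {_inventory[i][0]: _inventory[i][1] for i in range(len(_inventory))}
--     for i in range(len(requirements)):
--         try:
--             if _inv[requirements[i][0]] < requirements[i][1]:
--                 return False
--         except KeyError:
--             return False
--     return True
-- ===== SOURCE B (Python) =====
-- def check_inventory(_inventory, requirements):
--     # Stage 1: aggregate requirements into the maximum amount needed per distinct name.
--     need = {}
--     for name, qty in requirements: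
--         prev = need.get(name)
--         if prev is None or qty > prev:
--             need[name] = qty
--     # Stage 2: one reverse scan of the inventory resolves each needed name to its
--     # last-occurring quantity (first match in reverse order).
--     have = {}
--     for name, qty in reversed(_inventory):
--         if name in need and name not in have:
--             have[name] = qty
--     # Stage 3: every aggregated demand must be met.
--     return all(name in have and have[name] >= qty for name, qty in need.items())
-- ===== Notes on version B (the rewrite author's own statement) =====
-- stated objective: alternative
-- what changed: Instead of checking each requirement against an inventory index, B first aggregates requirements into the maximum amount needed per distinct name, then resolves each needed name by a single reverse scan of the inventory (first match in reverse = last occurrence), and finally checks every aggregated demand.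
import Mathlib
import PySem

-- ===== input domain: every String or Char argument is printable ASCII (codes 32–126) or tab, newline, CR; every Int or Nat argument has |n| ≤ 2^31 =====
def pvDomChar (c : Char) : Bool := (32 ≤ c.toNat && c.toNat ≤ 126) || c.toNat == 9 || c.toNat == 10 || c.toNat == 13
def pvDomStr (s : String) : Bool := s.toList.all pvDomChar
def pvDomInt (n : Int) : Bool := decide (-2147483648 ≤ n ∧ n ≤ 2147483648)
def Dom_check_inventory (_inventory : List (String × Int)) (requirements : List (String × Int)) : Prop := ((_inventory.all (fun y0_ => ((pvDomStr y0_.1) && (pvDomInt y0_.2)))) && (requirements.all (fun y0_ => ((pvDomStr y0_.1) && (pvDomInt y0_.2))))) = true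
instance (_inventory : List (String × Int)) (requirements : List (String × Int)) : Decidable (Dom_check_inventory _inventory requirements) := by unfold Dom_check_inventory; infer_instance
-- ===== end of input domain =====

-- B aggregates requirements into a per-name maximum demand, resolves those names by one
-- reverse scan of the inventory, and checks the aggregated demands (alternative algorithm).


-- ===== PORT A =====
-- the 'for i in range(len(requirements))' loop with its try/except KeyError
def checkInvLoopA (d : PySem.Dict String Int) : List (String × Int) → Bool
  | [] => true
  | r :: rs =>
    match d.get? r.1 with
    | none => false            -- KeyError branch: return False
    | some q => if q < r.2 then false else checkInvLoopA d rs

def check_inventory (_inventory : List (String × Int)) (requirements : List (String × Int)) : Bool :=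
  if requirements.length == 0 then true
  else
    -- dict comprehension over range(len(_inventory))
    let _inv := _inventory.foldl (fun d p => d.insert p.1 p.2) PySem.Dict.empty
    checkInvLoopA _inv requirements

-- ===== PORT B =====
-- Stage 1: need[name] = maximum quantity required for that name
def buildNeed (requirements : List (String × Int)) : PySem.Dict String Int :=
  requirements.foldl (fun d r =>
    match d.get? r.1 with
    | none => d.insert r.1 r.2
    | some prev => if r.2 > prev then d.insert r.1 r.2 else d) PySem.Dict.empty

-- Stage 2: reverse scan; first match in reverse order = last occurrence
def buildHave (need : PySem.Dict String Int) (_inventory : List (String × Int)) :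
    PySem.Dict String Int :=
  _inventory.reverse.foldl (fun h e =>
    if need.contains e.1 && !(h.contains e.1) then h.insert e.1 e.2 else h) PySem.Dict.empty

def check_inventory_alt (_inventory : List (String × Int)) (requirements : List (String × Int)) : Bool :=
  let need := buildNeed requirements
  let haveD := buildHave need _inventory
  -- Stage 3: all(name in have and have[name] >= qty for name, qty in need.items())
  need.items.all (fun r =>
    match haveD.get? r.1 with
    | none => false
    | some q => decide (r.2 ≤ q))

-- ===== PRECONDITION & SPEC =====
def Spec_check_inventory (_inventory : List (String × Int)) (requirements : List (String × Int)) (out : Bool) : Prop := out = check_inventory_alt _inventory requirements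
instance (_inventory : List (String × Int)) (requirements : List (String × Int)) (out : Bool) : Decidable (Spec_check_inventory _inventory requirements out) := by unfold Spec_check_inventory; infer_instance

-- ===== CLAIM (what is proved, stated in full; the proofs are below) =====
def Claim_equal_check_inventory : Prop := ∀ (_inventory : List (String × Int)) (requirements : List (String × Int)), Dom_check_inventory _inventory requirements → Spec_check_inventory _inventory requirements (check_inventory _inventory requirements)

-- ===== LEMMAS AND PROOFS =====

-- 'last occurrence' scan: lookup of k as A's fold-built dict computes it
def lastScan (inv : List (String × Int)) (k : String) : Option Int :=
  inv.foldl (fun acc p => if p.1 = k then some p.2 else acc) none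

-- first occurrence scan (what B's reverse loop resolves)
def firstScan : List (String × Int) → String → Option Int
  | [], _ => none
  | p :: ps, k => if p.1 = k then some p.2 else firstScan ps k

-- the per-key effect of B's stage-1 step
def omax (o : Option Int) (n : Int) : Option Int :=
  some (match o with | none => n | some m => if n > m then n else m)

def needScanF (k : String) (o : Option Int) (r : String × Int) : Option Int :=
  if r.1 = k then omax o r.2 else o

-- lookup in A's fold-built dict is the last matching entry
theorem fold_get? (inv : List (String × Int)) (d : PySem.Dict String Int) (k : String) :
    (inv.foldl (fun d p => d.insert p.1 p.2) d).get? k =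
      inv.foldl (fun acc p => if p.1 = k then some p.2 else acc) (d.get? k) := by
  induction inv generalizing d with
  | nil => rfl
  | cons p ps ih =>
    simp only [List.foldl_cons, ih, PySem.Dict.get?_insert]
    by_cases h : p.1 = k
    · simp [h]
    · simp [h, Ne.symm h]

-- A's loop is an 'all' over requirements
theorem loopA_eq_all (d : PySem.Dict String Int) (req : List (String × Int)) :
    checkInvLoopA d req =
      req.all (fun r => match d.get? r.1 with | none => false | some q => decide (r.2 ≤ q)) := by
  induction req with
  | nil => rfl
  | cons r rs ih =>
    simp only [checkInvLoopA, List.all_cons]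
    cases h : d.get? r.1 with
    | none => simp
    | some q =>
      by_cases hq : q < r.2
      · simp [hq, not_le.mpr hq]
      · simp [hq, not_lt.mp hq, ih]


-- lookup in B's stage-1 dict is the needScanF fold
theorem need_get? (req : List (String × Int)) (d : PySem.Dict String Int) (k : String) :
    ((req.foldl (fun d r =>
        match d.get? r.1 with
        | none => d.insert r.1 r.2
        | some prev => if r.2 > prev then d.insert r.1 r.2 else d) d).get? k) =
      req.foldl (needScanF k) (d.get? k) := by
  induction req generalizing d with
  | nil => rfl
  | cons r rs ih =>
    simp only [List.foldl_cons, ih]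
    congr 1
    cases h : d.get? r.1 with
    | none =>
      by_cases hk : r.1 = k
      · simp [needScanF, hk, omax, hk ▸ h]
      · simp [needScanF, hk, PySem.Dict.get?_insert, Ne.symm hk]
    | some prev =>
      by_cases hk : r.1 = k
      · by_cases hp : r.2 > prev
        · simp [needScanF, hk, omax, hp, hk ▸ h]
        · simp [needScanF, hk, omax, hp, hk ▸ h]
      · by_cases hp : r.2 > prev
        · simp [hp, needScanF, hk, PySem.Dict.get?_insert, Ne.symm hk]
        · simp [hp, needScanF, hk]

-- stage-1 fold keeps keys Nodup
theorem need_nodup (req : List (String × Int)) (d : PySem.Dict String Int)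
    (h : d.keys.Nodup) :
    (req.foldl (fun d r =>
        match d.get? r.1 with
        | none => d.insert r.1 r.2
        | some prev => if r.2 > prev then d.insert r.1 r.2 else d) d).keys.Nodup := by
  induction req generalizing d with
  | nil => exact h
  | cons r rs ih =>
    simp only [List.foldl_cons]
    apply ih
    cases d.get? r.1 with
    | none => exact PySem.Dict.nodup_keys_insert _ _ _ h
    | some prev =>
      by_cases hp : r.2 > prev
      · simp only [hp, if_true]; exact PySem.Dict.nodup_keys_insert _ _ _ h
      · simpa [hp] using h

-- monotone: once the scan holds some p at k, it ends with some m, p ≤ m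
theorem needScan_mono (rs : List (String × Int)) (k : String) (p : Int) :
    ∃ m, rs.foldl (needScanF k) (some p) = some m ∧ p ≤ m := by
  induction rs generalizing p with
  | nil => exact ⟨p, rfl, le_refl p⟩
  | cons r rs ih =>
    simp only [List.foldl_cons]
    by_cases hk : r.1 = k
    · by_cases hp : r.2 > p
      · obtain ⟨m, hm, hpm⟩ := ih r.2
        exact ⟨m, by simpa [needScanF, hk, omax, hp] using hm, le_trans (le_of_lt hp) hpm⟩
      · obtain ⟨m, hm, hpm⟩ := ih p
        exact ⟨m, by simpa [needScanF, hk, omax, hp] using hm, hpm⟩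
    · simpa [needScanF, hk] using ih p

-- every requirement is dominated by the scan's final value at its key
theorem needScan_of_mem (req : List (String × Int)) (r : String × Int) (hr : r ∈ req)
    (o : Option Int) :
    ∃ m, req.foldl (needScanF r.1) o = some m ∧ r.2 ≤ m := by
  induction req generalizing o with
  | nil => cases hr
  | cons r' rs ih =>
    simp only [List.foldl_cons]
    rcases List.mem_cons.mp hr with h | h
    · subst h
      cases o with
      | none =>
        have := needScan_mono rs r.1 r.2
        simpa [needScanF, omax] using this
      | some p =>
        by_cases hp : r.2 > p
        · have := needScan_mono rs r.1 r.2
          simpa [needScanF, omax, hp] using this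
        · obtain ⟨m, hm, hpm⟩ := needScan_mono rs r.1 p
          exact ⟨m, by simpa [needScanF, omax, hp] using hm,
            le_trans (not_lt.mp hp) hpm⟩
    · exact ih h _

-- the scan's final value is contributed by some requirement (or was the start)
theorem needScan_src (req : List (String × Int)) (k : String) (o : Option Int) (m : Int)
    (h : req.foldl (needScanF k) o = some m) :
    (∃ r ∈ req, r.1 = k ∧ r.2 = m) ∨ o = some m := by
  induction req generalizing o with
  | nil => exact Or.inr h
  | cons r rs ih =>
    simp only [List.foldl_cons] at h
    rcases ih _ h with h' | h'
    · obtain ⟨r', hr', hk, hv⟩ := h'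
      exact Or.inl ⟨r', List.mem_cons_of_mem _ hr', hk, hv⟩
    · by_cases hk : r.1 = k
      · cases o with
        | none =>
          simp only [needScanF, hk, if_true, omax] at h'
          exact Or.inl ⟨r, List.mem_cons_self, hk, (Option.some_inj.mp h')⟩
        | some p =>
          simp only [needScanF, hk, if_true, omax] at h'
          by_cases hp : r.2 > p
          · simp only [hp, if_true] at h'
            exact Or.inl ⟨r, List.mem_cons_self, hk, Option.some_inj.mp h'⟩
          · simp only [hp, if_false] at h'
            exact Or.inr h'
      · simp only [needScanF, hk, if_false] at h'
        exact Or.inr h'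


theorem firstScan_append (a b : List (String × Int)) (k : String) :
    firstScan (a ++ b) k =
      match firstScan a k with
      | some v => some v
      | none => firstScan b k := by
  induction a with
  | nil => simp [firstScan]
  | cons p ps ih =>
    by_cases h : p.1 = k
    · simp [firstScan, h]
    · simp [firstScan, h, ih]

theorem lastScan_eq_firstScan_reverse (inv : List (String × Int)) (k : String) :
    lastScan inv k = firstScan inv.reverse k := by
  suffices h : ∀ (l : List (String × Int)) (o : Option Int),
      l.foldl (fun acc p => if p.1 = k then some p.2 else acc) o =
        match firstScan l.reverse k with
        | some v => some v
        | none => o by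
    have := h inv none
    simp only [lastScan, this]
    cases firstScan inv.reverse k <;> rfl
  intro l
  induction l with
  | nil => intro o; rfl
  | cons p ps ih =>
    intro o
    simp only [List.foldl_cons, List.reverse_cons, firstScan_append, ih]
    cases hf : firstScan ps.reverse k with
    | some v => rfl
    | none => by_cases h : p.1 = k <;> simp [firstScan, h]

-- B's stage-2 lookup: for a needed key, 'have' holds the first match of the scanned list
theorem have_get? (need : PySem.Dict String Int) (l : List (String × Int))
    (h : PySem.Dict String Int) (k : String) (hk : need.contains k = true) :
    (l.foldl (fun h e =>
        if need.contains e.1 && !(h.contains e.1) then h.insert e.1 e.2 else h) h).get? k =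
      if h.contains k then h.get? k else firstScan l k := by
  induction l generalizing h with
  | nil =>
    simp only [List.foldl_nil, firstScan]
    by_cases hc : h.contains k
    · simp [hc]
    · have h2 : h.get? k = none := by
        cases hg : h.get? k with
        | none => rfl
        | some v =>
          have hcs := PySem.Dict.contains_eq_isSome_get? (d := h) (k := k)
          rw [hg] at hcs
          simp [hcs] at hc
      simp [hc, h2]
  | cons e l ih =>
    simp only [List.foldl_cons]
    by_cases hc : need.contains e.1 && !(h.contains e.1)
    · simp only [hc, if_true]
      rw [ih]
      by_cases hek : e.1 = k
      · subst hek
        have hh : h.contains e.1 = false := by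
          rcases Bool.and_eq_true_iff.mp hc with ⟨_, hnc⟩
          simpa using hnc
        simp [hh, firstScan]
      · simp [PySem.Dict.contains_insert, hek, Ne.symm hek,
          PySem.Dict.get?_insert, firstScan]
    · simp only [hc]
      rw [ih]
      by_cases hhk : h.contains k
      · simp [hhk]
      · have hek : e.1 ≠ k := by
          intro he
          subst he
          have : ¬ (need.contains e.1 && !(h.contains e.1)) = true := hc
          simp [hk, hhk] at this
        simp [hhk, firstScan, hek]


theorem matchb_iff (o : Option Int) (n : Int) :
    (match o with | none => false | some q => decide (n ≤ q)) = true ↔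
      ∃ q, o = some q ∧ n ≤ q := by
  cases o <;> simp

-- A = true iff every requirement is met by the last matching inventory entry
theorem A_iff (inv req : List (String × Int)) :
    check_inventory inv req = true ↔
      ∀ r ∈ req, ∃ q, lastScan inv r.1 = some q ∧ r.2 ≤ q := by
  unfold check_inventory
  by_cases h : req.length == 0
  · have hnil : req = [] := by simpa using h
    subst hnil; simp
  · have h' : (req.length == 0) = false := by simpa using h
    simp only [h', Bool.false_eq_true, if_false]
    rw [loopA_eq_all, List.all_eq_true]
    apply forall_congr'
    intro r
    apply imp_congr Iff.rfl
    have hget : (inv.foldl (fun d p => d.insert p.1 p.2) PySem.Dict.empty).get? r.1 =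
        lastScan inv r.1 := by
      rw [fold_get?]; rfl
    rw [hget]
    exact matchb_iff _ _

-- B = true iff every aggregated demand is met by the last matching inventory entry
theorem B_iff (inv req : List (String × Int)) :
    check_inventory_alt inv req = true ↔
      ∀ k m, (buildNeed req).get? k = some m → ∃ q, lastScan inv k = some q ∧ m ≤ q := by
  have hnd : (buildNeed req).keys.Nodup := by
    unfold buildNeed
    exact need_nodup req PySem.Dict.empty (by simp)
  have hget : ∀ k m, (buildNeed req).get? k = some m →
      (buildHave (buildNeed req) inv).get? k = lastScan inv k := by
    intro k m hkm
    have hc : (buildNeed req).contains k = true := by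
      rw [PySem.Dict.contains_eq_isSome_get?, hkm]; rfl
    unfold buildHave
    rw [have_get? _ _ _ _ hc, lastScan_eq_firstScan_reverse]
    simp
  unfold check_inventory_alt
  rw [List.all_eq_true]
  constructor
  · intro hall k m hkm
    have hp : (k, m) ∈ (buildNeed req).items :=
      (PySem.Dict.get?_eq_some_iff_mem_items _ k m hnd).mp hkm
    have := hall (k, m) hp
    rw [hget k m hkm] at this
    exact (matchb_iff _ _).mp this
  · intro hall p hp
    have hkm : (buildNeed req).get? p.1 = some p.2 :=
      (PySem.Dict.get?_eq_some_iff_mem_items _ p.1 p.2 hnd).mpr hp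
    rw [hget p.1 p.2 hkm]
    exact (matchb_iff _ _).mpr (hall p.1 p.2 hkm)

-- the per-key bridge: requirements check ↔ aggregated-maximum check
theorem bridge (inv req : List (String × Int)) :
    (∀ r ∈ req, ∃ q, lastScan inv r.1 = some q ∧ r.2 ≤ q) ↔
      (∀ k m, (buildNeed req).get? k = some m → ∃ q, lastScan inv k = some q ∧ m ≤ q) := by
  have hneed : ∀ k, (buildNeed req).get? k = req.foldl (needScanF k) none := by
    intro k; unfold buildNeed; rw [need_get?]; rfl
  constructor
  · intro hall k m hkm
    rw [hneed] at hkm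
    rcases needScan_src req k none m hkm with ⟨r, hr, hk, hv⟩ | h
    · subst hk; subst hv
      exact hall r hr
    · cases h
  · intro hall r hr
    obtain ⟨m, hm, hrm⟩ := needScan_of_mem req r hr none
    obtain ⟨q, hq, hmq⟩ := hall r.1 m (by rw [hneed]; exact hm)
    exact ⟨q, hq, le_trans hrm hmq⟩

-- ===== VERDICT (by name: the statement is the Claim_ definition above) =====
theorem check_inventory_spec : Claim_equal_check_inventory := by
  intro inv req _
  unfold Spec_check_inventory
  rw [Bool.eq_iff_iff, A_iff, B_iff]
  exact bridge inv req
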